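-- pv_equiv track=rewrite | github.com/intel/Intel-ECI-ExCat-Ansible | excat/filter_plugins/plugins.py | get_unused
-- ===== SOURCE A (Python) =====
-- def dec2bin(dec):
--     """Convert decimal to binary (output as string)."""
--     return format(dec, 'b')
--
-- def cacheways2bitmask(cacheways):
--     """Convert cacheways to binary mask (output as string)."""
--     bitmask_bin = 0b0
--     for i in range(cacheways):
--         bitmask_bin = bitmask_bin | 0b1 << i
--     return format(bitmask_bin, 'b')
--
-- def get_unused(bitmask_dec):
--     """Get unused slots."""
--     in_slot = False
--     index, length = 0,0
--     slots = []
--     len_bitmask = len(dec2bin(bitmask_dec))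
--     for i in range(len_bitmask):
--         if not(bitmask_dec & (1<<i)): # pylint: disable=superfluous-parens
--             if not in_slot:
--                 index, length = i, 1
--                 in_slot = True
--             else:
--                 length += 1
--         else:
--             if in_slot:
--                 slot_bitmask = format(int(cacheways2bitmask(length),base=2) << index, 'x')
--                 slots.append([index, length, slot_bitmask])
--                 in_slot = False
--     return slots
-- ===== SOURCE B (Python) =====
-- def get_unused(bitmask_dec):
--     """Get unused slots."""
--     n = len(format(bitmask_dec, 'b'))
--     ones = [i for i in range(n) if bitmask_dec & (1 << i)]
--     slots = []
--     prev = -1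
--     for p in ones:
--         length = p - prev - 1
--         if length > 0:
--             index = prev + 1
--             slots.append([index, length, format(((1 << length) - 1) << index, 'x')])
--         prev = p
--     return slots
-- ===== Notes on version B (the rewrite author's own statement) =====
-- stated objective: alternative
-- what changed: Replaces the per-bit in/out-of-slot state machine by first collecting the set-bit positions and then emitting one slot per gap between consecutive set bits (previous-one walk), computing the slot mask directly as ((1<<length)-1)<<index instead of the binary-string round-trip through cacheways2bitmask/int(...,2).
import Mathlib
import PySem

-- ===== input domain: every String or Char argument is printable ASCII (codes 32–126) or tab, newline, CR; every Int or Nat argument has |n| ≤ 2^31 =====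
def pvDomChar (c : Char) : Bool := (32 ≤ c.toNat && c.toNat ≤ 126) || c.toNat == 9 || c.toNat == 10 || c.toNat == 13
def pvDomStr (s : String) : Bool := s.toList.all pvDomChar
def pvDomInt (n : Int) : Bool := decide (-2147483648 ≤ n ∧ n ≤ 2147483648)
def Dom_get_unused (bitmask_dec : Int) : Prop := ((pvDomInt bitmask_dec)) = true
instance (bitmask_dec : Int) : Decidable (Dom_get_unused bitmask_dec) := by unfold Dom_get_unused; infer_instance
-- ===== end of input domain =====

-- B replaces A's per-bit in/out-of-slot state machine by a walk over the set-bit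
-- positions emitting one slot per gap, with the slot mask computed directly as
-- ((1<<length)-1)<<index instead of A's binary-string round-trip. (objective: alternative)

-- shared formatting helper: format(n, 'x') — exact: lowercase hex digits of |n|, '-' first
-- for negatives (Nat.digitChar yields '0'-'9','a'-'f' for base 16; toDigits 16 0 = ['0'])
def pyHex (n : Int) : String :=
  if n < 0 then String.ofList ('-' :: Nat.toDigits 16 n.natAbs)
  else String.ofList (Nat.toDigits 16 n.toNat)

-- ===== PORT A =====
def dec2bin (dec : Int) : String := PySem.Int.toBin dec

def cacheways2bitmask (cacheways : Int) : String :=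
  let bitmask_bin : Int :=
    (PySem.List.pyRange 0 cacheways 1).foldl
      (fun bb i => PySem.Int.bor bb ((1 : Int) <<< i.toNat)) 0
  PySem.Int.toBin bitmask_bin

-- loop body of A: state (in_slot, index, length, slots); i ≥ 0 throughout (range), so
-- Python's 1 << i is (1 : Int) <<< i.toNat; int(s, base=2) never raises here (s is a
-- format(_, 'b') output), so the Option is read with getD.
def stepA (bitmask_dec : Int) (st : Bool × Int × Int × List (Int × Int × String)) (i : Int) :
    Bool × Int × Int × List (Int × Int × String) :=
  let in_slot := st.1; let index := st.2.1; let length := st.2.2.1; let slots := st.2.2.2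
  if PySem.Int.band bitmask_dec ((1 : Int) <<< i.toNat) = 0 then
    if in_slot = false then (true, i, 1, slots)
    else (in_slot, index, length + 1, slots)
  else
    if in_slot = true then
      let slot_bitmask :=
        pyHex (((PySem.Int.ofStrBase? (cacheways2bitmask length) 2).getD 0) <<< index.toNat)
      (false, index, length, slots ++ [(index, length, slot_bitmask)])
    else st

def get_unused (bitmask_dec : Int) : List (Int × Int × String) :=
  let len_bitmask := PySem.Str.len (dec2bin bitmask_dec)
  let fin := (PySem.List.pyRange 0 len_bitmask 1).foldl (stepA bitmask_dec) (false, 0, 0, [])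
  fin.2.2.2

-- ===== PORT B =====
def usedBit (bitmask_dec : Int) (i : Int) : Bool :=
  PySem.Int.band bitmask_dec ((1 : Int) <<< i.toNat) != 0

-- loop body of B: state (prev, slots)
def stepB (st : Int × List (Int × Int × String)) (p : Int) :
    Int × List (Int × Int × String) :=
  let prev := st.1; let slots := st.2
  let length := p - prev - 1
  if 0 < length then
    (p, slots ++ [(prev + 1, length,
        pyHex ((((1 : Int) <<< length.toNat) - 1) <<< (prev + 1).toNat))])
  else (p, slots)

def get_unused_alt (bitmask_dec : Int) : List (Int × Int × String) :=
  let n := PySem.Str.len (PySem.Int.toBin bitmask_dec)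
  let ones := (PySem.List.pyRange 0 n 1).filter (usedBit bitmask_dec)
  (ones.foldl stepB (-1, [])).2

-- ===== PRECONDITION & SPEC =====
def Spec_get_unused (bitmask_dec : Int) (out : List (Int × Int × String)) : Prop := out = get_unused_alt bitmask_dec
instance (bitmask_dec : Int) (out : List (Int × Int × String)) : Decidable (Spec_get_unused bitmask_dec out) := by unfold Spec_get_unused; infer_instance

-- ===== CLAIM (what is proved, stated in full; the proofs are below) =====
def Claim_equal_get_unused : Prop := ∀ (bitmask_dec : Int), Dom_get_unused bitmask_dec → Spec_get_unused bitmask_dec (get_unused bitmask_dec)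

-- ===== LEMMAS AND PROOFS =====

-- int(cacheways2bitmask(L), 2) is 2^L - 1, for all slot lengths that can occur (L < 33)
lemma c2b_val_nat : ∀ k : Nat, k < 33 →
    (PySem.Int.ofStrBase? (cacheways2bitmask (k : Int)) 2).getD 0 = ((1 : Int) <<< k) - 1 := by
  decide

lemma c2b_val (L : Int) (h1 : 1 ≤ L) (h2 : L ≤ 32) :
    (PySem.Int.ofStrBase? (cacheways2bitmask L) 2).getD 0 = ((1 : Int) <<< L.toNat) - 1 := by
  have : L = (L.toNat : Int) := by omega
  rw [this]
  exact c2b_val_nat L.toNat (by omega)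

-- the two loops agree: A's state machine over bits a..N-1 versus B's previous-one walk
-- over the set bits among a..N-1
lemma loop_eq (bd N : Int) (hN : N ≤ 33) :
    ∀ (k : Nat) (a : Int), a + k = N → 0 ≤ a →
    ∀ (in_slot : Bool) (index length prev : Int) (slots : List (Int × Int × String)),
    (in_slot = true → prev = index - 1 ∧ length = a - index ∧ 0 ≤ index ∧ 1 ≤ length) →
    (in_slot = false → prev = a - 1) →
    ((PySem.List.pyRange a N 1).foldl (stepA bd) (in_slot, index, length, slots)).2.2.2
      = (((PySem.List.pyRange a N 1).filter (usedBit bd)).foldl stepB (prev, slots)).2 := by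
  intro k
  induction k with
  | zero =>
      intro a ha _ in_slot index length prev slots _ _
      rw [PySem.List.pyRange_one_eq_nil (by omega)]
      simp
  | succ k ih =>
      intro a ha ha0 in_slot index length prev slots hT hF
      rw [PySem.List.pyRange_one_cons (by omega)]
      rw [List.filter_cons]
      by_cases hbit : PySem.Int.band bd ((1 : Int) <<< a.toNat) = 0
      · -- unused bit: filter drops a, A extends / opens the slot
        have hu : usedBit bd a = false := by simp [usedBit, hbit]
        rw [hu]
        simp only [List.foldl_cons, Bool.false_eq_true, if_false]
        cases in_slot with
        | false =>
            have hp := hF rfl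
            have hA : stepA bd (false, index, length, slots) a = (true, a, 1, slots) := by
              simp [stepA, hbit]
            rw [hA]
            exact ih (a + 1) (by omega) (by omega) true a 1 prev slots
              (fun _ => ⟨by omega, by omega, by omega, by omega⟩) (by simp)
        | true =>
            obtain ⟨hp, hl, hi0, hl1⟩ := hT rfl
            have hA : stepA bd (true, index, length, slots) a = (true, index, length + 1, slots) := by
              simp [stepA, hbit]
            rw [hA]
            exact ih (a + 1) (by omega) (by omega) true index (length + 1) prev slots
              (fun _ => ⟨hp, by omega, hi0, by omega⟩) (by simp)
      · -- used bit: filter keeps a, B takes a step with p = a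
        have hu : usedBit bd a = true := by simp [usedBit, hbit]
        rw [hu]
        simp only [List.foldl_cons, if_true]
        cases in_slot with
        | false =>
            have hp := hF rfl
            have hA : stepA bd (false, index, length, slots) a = (false, index, length, slots) := by
              simp [stepA, hbit]
            have hB : stepB (prev, slots) a = (a, slots) := by
              simp [stepB]; omega
            rw [hA, hB]
            exact ih (a + 1) (by omega) (by omega) false index length a slots
              (by simp) (fun _ => by omega)
        | true =>
            obtain ⟨hp, hl, hi0, hl1⟩ := hT rfl
            have hlen32 : length ≤ 32 := by omega
            have hexeq :
                pyHex (((PySem.Int.ofStrBase? (cacheways2bitmask length) 2).getD 0) <<< index.toNat)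
                  = pyHex ((((1 : Int) <<< (a - prev - 1).toNat) - 1) <<< (prev + 1).toNat) := by
              have h1 : a - prev - 1 = length := by omega
              have h2 : prev + 1 = index := by omega
              rw [h1, h2, c2b_val length hl1 hlen32]
            have hA : stepA bd (true, index, length, slots) a
                = (false, index, length,
                   slots ++ [(index, length,
                     pyHex (((PySem.Int.ofStrBase? (cacheways2bitmask length) 2).getD 0) <<< index.toNat))]) := by
              simp [stepA, hbit]
            have hB : stepB (prev, slots) a
                = (a, slots ++ [(prev + 1, a - prev - 1,
                     pyHex ((((1 : Int) <<< (a - prev - 1).toNat) - 1) <<< (prev + 1).toNat))]) := by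
              simp [stepB]; omega
            rw [hA, hB, hexeq]
            have hcomp : (index, length,
                pyHex ((((1 : Int) <<< (a - prev - 1).toNat) - 1) <<< (prev + 1).toNat))
                = (prev + 1, a - prev - 1,
                pyHex ((((1 : Int) <<< (a - prev - 1).toNat) - 1) <<< (prev + 1).toNat)) := by
              have h1 : a - prev - 1 = length := by omega
              have h2 : prev + 1 = index := by omega
              rw [h1, h2]
            rw [hcomp]
            exact ih (a + 1) (by omega) (by omega) false index length a
              (slots ++ [(prev + 1, a - prev - 1,
                 pyHex ((((1 : Int) <<< (a - prev - 1).toNat) - 1) <<< (prev + 1).toNat))])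
              (by simp) (fun _ => by omega)

-- the bit range has length at most 33 on the domain: at most 32 binary digits plus a sign
lemma len_toBin_le (n : Int) (h : Dom_get_unused n) :
    PySem.Str.len (PySem.Int.toBin n) ≤ 33 := by
  have habs : n.natAbs < 2 ^ 32 := by
    unfold Dom_get_unused pvDomInt at h
    simp only [decide_eq_true_eq] at h
    omega
  have hd : (Nat.toDigits 2 n.natAbs).length ≤ 32 :=
    Nat.toDigits_length 2 n.natAbs 32 (by norm_num) habs
  simp only [PySem.Str.len_eq, PySem.Int.toBin, String.toList_ofList, PySem.Int.toBinChars]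
  split_ifs with hneg
  · simp only [List.length_cons]
    omega
  · have : n.toNat = n.natAbs := by omega
    rw [this]
    omega

lemma len_toBin_nonneg (n : Int) : 0 ≤ PySem.Str.len (PySem.Int.toBin n) := by
  simp [PySem.Str.len_eq]

-- ===== VERDICT (by name: the statement is the Claim_ definition above) =====
theorem get_unused_spec : Claim_equal_get_unused := by
  intro bd hDom
  unfold Spec_get_unused get_unused get_unused_alt dec2bin
  have hle := len_toBin_le bd hDom
  have h0 := len_toBin_nonneg bd
  exact loop_eq bd (PySem.Str.len (PySem.Int.toBin bd)) hle
    (PySem.Str.len (PySem.Int.toBin bd)).toNat 0 (by omega) le_rfl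
    false 0 0 (-1) [] (by simp) (fun _ => by norm_num)
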